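-- pv_equiv track=rewrite | github.com/thom-heinrich/twinr | src/twinr/agent/personality/context_builder.py | _normalized_legacy_sections
-- ===== SOURCE A (Python) =====
-- def _merge_blocks(*blocks: str | None) -> str | None:
--     """Join non-empty text blocks with stable blank-line separation."""
--
--     normalized = [str(block).strip() for block in blocks if block and str(block).strip()]
--     if not normalized:
--         return None
--     return "\n\n".join(normalized)
--
-- def _merge_legacy_priority_section(
--     legacy_sections: tuple[tuple[str, str], ...],
--     title: str,
-- ) -> str | None:
--     """Merge duplicate priority sections in their original order."""
--
--     normalized_title = str(title).strip().upper()
--     return _merge_blocks(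
--         *(
--             str(content).strip()
--             for raw_title, content in legacy_sections
--             if str(raw_title).strip().upper() == normalized_title and str(content).strip()
--         )
--     )
--
-- def _normalized_legacy_sections(
--     legacy_sections: tuple[tuple[str, str], ...],
-- ) -> dict[str, str]:
--     """Normalize legacy sections into an uppercase-keyed merged mapping."""
--
--     merged_sections: dict[str, str] = {}
--     for raw_title, raw_content in legacy_sections:
--         title = str(raw_title).strip().upper()
--         if not title or not str(raw_content).strip() or title in merged_sections:
--             continue
--         merged = _merge_legacy_priority_section(legacy_sections, title)
--         if merged:
--             merged_sections[title] = merged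
--     return merged_sections
-- ===== SOURCE B (Python) =====
-- def _normalized_legacy_sections(legacy_sections):
--     """Normalize legacy sections into an uppercase-keyed merged mapping.
--
--     Single pass: group non-empty stripped contents by uppercase stripped
--     title (first-occurrence key order), then join each group once.
--     """
--     groups = {}
--     for raw_title, raw_content in legacy_sections:
--         title = str(raw_title).strip().upper()
--         content = str(raw_content).strip()
--         if title and content:
--             groups[title] = groups.get(title, []) + [content]
--     return {title: "\n\n".join(contents) for title, contents in groups.items()}
-- ===== Notes on version B (the rewrite author's own statement) =====
-- stated objective: faster
-- what changed: Replaces A's per-title rescan of the whole list (a quadratic merge recomputed for every new title) by a single grouping pass that accumulates stripped contents per uppercase title, followed by one join per key.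
import Mathlib
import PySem

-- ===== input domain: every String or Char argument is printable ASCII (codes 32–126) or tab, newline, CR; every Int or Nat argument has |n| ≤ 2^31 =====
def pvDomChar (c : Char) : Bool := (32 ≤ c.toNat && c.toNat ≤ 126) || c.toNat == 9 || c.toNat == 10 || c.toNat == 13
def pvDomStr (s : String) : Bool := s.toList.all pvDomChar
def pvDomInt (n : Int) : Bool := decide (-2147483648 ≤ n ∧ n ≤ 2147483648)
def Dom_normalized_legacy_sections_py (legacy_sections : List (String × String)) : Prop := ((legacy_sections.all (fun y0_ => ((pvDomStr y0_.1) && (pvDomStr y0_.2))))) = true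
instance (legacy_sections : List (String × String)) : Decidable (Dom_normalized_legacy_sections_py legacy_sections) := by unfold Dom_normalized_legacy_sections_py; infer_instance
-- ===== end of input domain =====

-- B replaces A's quadratic rescan-per-title with a single grouping pass followed by one join per key (alternative/faster strategy); return value only, no mutation involved.

-- ===== PORT A =====
-- _merge_blocks: join non-empty stripped blocks with "\n\n", None if none remain
def mergeBlocksA (blocks : List String) : Option String :=
  let normalized := (blocks.filter (fun b => b ≠ "" && PySem.Str.strip b ≠ "")).map PySem.Str.strip
  if normalized = [] then none else some (PySem.Str.join "\n\n" normalized)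

-- _merge_legacy_priority_section
def mergeLegacyPrioritySectionA (legacy_sections : List (String × String)) (title : String) : Option String :=
  let normalized_title := PySem.Str.upper (PySem.Str.strip title)
  mergeBlocksA
    ((legacy_sections.filter
        (fun p => PySem.Str.upper (PySem.Str.strip p.1) == normalized_title && PySem.Str.strip p.2 ≠ "")).map
      (fun p => PySem.Str.strip p.2))

def normalized_legacy_sections_py (legacy_sections : List (String × String)) : List (String × String) :=
  (legacy_sections.foldl
    (fun (merged_sections : PySem.Dict String String) p =>
      let title := PySem.Str.upper (PySem.Str.strip p.1)
      if title = "" ∨ PySem.Str.strip p.2 = "" ∨ merged_sections.contains title then merged_sections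
      else
        match mergeLegacyPrioritySectionA legacy_sections title with
        | none => merged_sections
        | some merged => if merged = "" then merged_sections else merged_sections.insert title merged)
    PySem.Dict.empty).items

-- ===== PORT B =====
def normalized_legacy_sections_py_alt (legacy_sections : List (String × String)) : List (String × String) :=
  let groups : PySem.Dict String (List String) :=
    legacy_sections.foldl
      (fun g p =>
        let title := PySem.Str.upper (PySem.Str.strip p.1)
        let content := PySem.Str.strip p.2
        if title ≠ "" ∧ content ≠ "" then g.insert title (g.getD title [] ++ [content]) else g)
      PySem.Dict.empty
  (PySem.Dict.ofList (groups.items.map (fun q => (q.1, PySem.Str.join "\n\n" q.2)))).items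

-- ===== PRECONDITION & SPEC =====
def Spec_normalized_legacy_sections_py (legacy_sections : List (String × String)) (out : List (String × String)) : Prop := out = normalized_legacy_sections_py_alt legacy_sections
instance (legacy_sections : List (String × String)) (out : List (String × String)) : Decidable (Spec_normalized_legacy_sections_py legacy_sections out) := by unfold Spec_normalized_legacy_sections_py; infer_instance

-- ===== CLAIM (what is proved, stated in full; the proofs are below) =====
def Claim_equal_normalized_legacy_sections_py : Prop := ∀ (legacy_sections : List (String × String)), Dom_normalized_legacy_sections_py legacy_sections → Spec_normalized_legacy_sections_py legacy_sections (normalized_legacy_sections_py legacy_sections)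

-- ===== LEMMAS AND PROOFS =====

-- normalization of one pair: uppercase stripped title, stripped content, kept when both non-empty
def pvKey (p : String × String) : String := PySem.Str.upper (PySem.Str.strip p.1)
def pvCnt (p : String × String) : String := PySem.Str.strip p.2
def pvNorm (p : String × String) : Option (String × String) :=
  if pvKey p ≠ "" ∧ pvCnt p ≠ "" then some (pvKey p, pvCnt p) else none
def pvM (L : List (String × String)) : List (String × String) := L.filterMap pvNorm
def pvVal (L : List (String × String)) (k : String) : String :=
  PySem.Str.join "\n\n" (((pvM L).filter (fun q => q.1 == k)).map (fun q => q.2))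
def pvSpecList (L : List (String × String)) : List (String × String) :=
  (PySem.Set.ofList ((pvM L).map (fun q => q.1))).map (fun k => (k, pvVal L k))
def pvD (L : List (String × String)) (kp : List String) : PySem.Dict String String :=
  ⟨(PySem.Set.ofList kp).map (fun k => (k, pvVal L k))⟩

-- ---- character/string facts ----

lemma pvIsspaceComp :
    (PySem.Chars.isspace ∘ PySem.Chars.upperChar) = PySem.Chars.isspace := by
  funext c
  simp only [Function.comp_apply]
  simp only [PySem.Chars.upperChar, PySem.Chars.islower]
  split_ifs with h
  · simp only [decide_eq_true_eq, Bool.and_eq_true] at h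
    have h1 : 97 ≤ c.toNat := h.1
    have h2 : c.toNat ≤ 122 := h.2
    have hv : (Char.ofNat (c.toNat - 32)).toNat = c.toNat - 32 := by
      rw [Char.toNat_ofNat, if_pos]; exact Or.inl (by omega)
    have hl : PySem.Chars.isspace c = false := by
      simp only [PySem.Chars.isspace, Bool.or_eq_false_iff, Bool.and_eq_false_iff,
        decide_eq_false_iff_not]
      omega
    have hr : PySem.Chars.isspace (Char.ofNat (c.toNat - 32)) = false := by
      simp only [PySem.Chars.isspace, hv, Bool.or_eq_false_iff, Bool.and_eq_false_iff,
        decide_eq_false_iff_not]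
      omega
    rw [hl, hr]
  · rfl

lemma pvUpperCharUpperChar (c : Char) :
    PySem.Chars.upperChar (PySem.Chars.upperChar c) = PySem.Chars.upperChar c := by
  simp only [PySem.Chars.upperChar, PySem.Chars.islower]
  split_ifs with h h2
  · exfalso
    simp only [decide_eq_true_eq, Bool.and_eq_true] at h h2
    have h1 : 97 ≤ c.toNat := h.1
    have h1' : c.toNat ≤ 122 := h.2
    have hv : (Char.ofNat (c.toNat - 32)).toNat = c.toNat - 32 := by
      rw [Char.toNat_ofNat, if_pos]; exact Or.inl (by omega)
    have ha : 97 ≤ (Char.ofNat (c.toNat - 32)).toNat := h2.1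
    omega
  · rfl
  · rfl

lemma pvUpperUpperChars (l : List Char) :
    PySem.Chars.upper (PySem.Chars.upper l) = PySem.Chars.upper l := by
  simp only [PySem.Chars.upper, List.map_map]
  exact List.map_congr_left (fun c _ => pvUpperCharUpperChar c)

lemma pvLstripUpperChars (l : List Char) :
    PySem.Chars.lstrip (PySem.Chars.upper l) = PySem.Chars.upper (PySem.Chars.lstrip l) := by
  simp only [PySem.Chars.lstrip, PySem.Chars.upper, List.dropWhile_map, pvIsspaceComp]

lemma pvRstripUpperChars (l : List Char) :
    PySem.Chars.rstrip (PySem.Chars.upper l) = PySem.Chars.upper (PySem.Chars.rstrip l) := by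
  simp only [PySem.Chars.rstrip, PySem.Chars.upper]
  rw [← List.map_reverse, List.dropWhile_map, pvIsspaceComp, ← List.map_reverse]

lemma pvStripUpperChars (l : List Char) :
    PySem.Chars.strip (PySem.Chars.upper l) = PySem.Chars.upper (PySem.Chars.strip l) := by
  simp only [PySem.Chars.strip, pvLstripUpperChars, pvRstripUpperChars]

lemma pvRstripPrefix (l : List Char) : PySem.Chars.rstrip l <+: l := by
  simpa using (List.dropWhile_suffix (l := l.reverse) PySem.Chars.isspace).reverse

lemma pvLstripOfDropWhile (l : List Char) :
    PySem.Chars.lstrip (PySem.Chars.rstrip (PySem.Chars.lstrip l)) =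
      PySem.Chars.rstrip (PySem.Chars.lstrip l) := by
  rcases hv : PySem.Chars.rstrip (PySem.Chars.lstrip l) with _ | ⟨x, xs⟩
  · simp [PySem.Chars.lstrip]
  · obtain ⟨t, ht⟩ := pvRstripPrefix (PySem.Chars.lstrip l)
    rw [hv] at ht
    have hx : PySem.Chars.isspace x = false := by
      have h2 := List.head?_dropWhile_not PySem.Chars.isspace l
      rw [show List.dropWhile PySem.Chars.isspace l = PySem.Chars.lstrip l from rfl, ← ht] at h2
      simpa using h2
    simp [PySem.Chars.lstrip, hx]

lemma pvRstripRstrip (l : List Char) :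
    PySem.Chars.rstrip (PySem.Chars.rstrip l) = PySem.Chars.rstrip l := by
  simp [PySem.Chars.rstrip, List.dropWhile_idempotent]

lemma pvStripStripChars (l : List Char) :
    PySem.Chars.strip (PySem.Chars.strip l) = PySem.Chars.strip l := by
  simp only [PySem.Chars.strip]
  rw [pvLstripOfDropWhile, pvRstripRstrip]

lemma pvNeNil (s : String) (h : s ≠ "") : s.toList ≠ [] := by
  intro hc
  exact h (String.ext (by simp [hc]))

lemma pvStripStrip (s : String) :
    PySem.Str.strip (PySem.Str.strip s) = PySem.Str.strip s := by
  apply String.ext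
  simp only [PySem.Str.toList_strip, pvStripStripChars]

lemma pvKeyFix (s : String) :
    PySem.Str.upper (PySem.Str.strip (PySem.Str.upper (PySem.Str.strip s))) =
      PySem.Str.upper (PySem.Str.strip s) := by
  apply String.ext
  simp only [PySem.Str.toList_upper, PySem.Str.toList_strip, pvStripUpperChars,
    pvStripStripChars, pvUpperUpperChars]

lemma pvJoinNeEmpty (c : String) (rest : List String) (hc : c ≠ "") :
    PySem.Str.join "\n\n" (c :: rest) ≠ "" := by
  intro h
  have h' := congrArg String.toList h
  rw [PySem.Str.toList_join] at h'
  have hcl : c.toList ≠ [] := pvNeNil c hc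
  rcases rest with _ | ⟨b, bs⟩
  · rw [show List.map String.toList [c] = [c.toList] from rfl] at h'
    exact hcl (by simpa [PySem.Chars.join, List.intercalate] using h')
  · rw [show List.map String.toList (c :: b :: bs) = c.toList :: b.toList :: List.map String.toList bs from rfl] at h'
    rw [show PySem.Chars.join "\n\n".toList (c.toList :: b.toList :: List.map String.toList bs) = c.toList ++ "\n\n".toList ++ PySem.Chars.join "\n\n".toList (b.toList :: List.map String.toList bs) from by simp [PySem.Chars.join, List.intercalate, List.intersperse]] at h'
    simp at h'

-- ---- facts about pvM and pvD ----
lemma pvMemM (L : List (String × String)) (q : String × String) (hq : q ∈ pvM L) :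
    q.2 ≠ "" ∧ PySem.Str.strip q.2 = q.2 ∧ PySem.Str.upper (PySem.Str.strip q.1) = q.1 ∧ q.1 ≠ "" := by
  obtain ⟨p, -, hp⟩ : ∃ p ∈ L, pvNorm p = some q := by
    simpa only [pvM, List.mem_filterMap] using hq
  rw [pvNorm] at hp
  split_ifs at hp with h
  · obtain rfl : (pvKey p, pvCnt p) = q := Option.some.inj hp
    exact ⟨h.2, pvStripStrip p.2, pvKeyFix p.1, h.1⟩

lemma pvContainsD (L : List (String × String)) (kp : List String) (k : String) :
    (pvD L kp).contains k = decide (k ∈ PySem.Set.ofList kp) := by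
  rw [pvD, PySem.Dict.contains, Bool.eq_iff_iff]
  simp [List.any_map, Function.comp_def, List.any_eq_true]

lemma pvDSkip (L : List (String × String)) (kp : List String) (k : String) (r : List String)
    (hk : k ∈ PySem.Set.ofList kp) : pvD L (kp ++ k :: r) = pvD L (kp ++ r) := by
  have hadd : (PySem.Set.ofList kp).add k = PySem.Set.ofList kp := by
    simp [PySem.Set.add, hk]
  rw [pvD, pvD, PySem.Set.ofList_append, PySem.Set.ofList_append, PySem.Set.update_cons, hadd]

-- ---- A's merge helper computes pvVal ----
lemma pvFilterEq (L : List (String × String)) (k : String) (hk : k ≠ "") :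
    ((L.filter (fun p => PySem.Str.upper (PySem.Str.strip p.1) == k && PySem.Str.strip p.2 ≠ "")).map
        (fun p => PySem.Str.strip p.2)) =
      ((pvM L).filter (fun q => q.1 == k)).map (fun q => q.2) := by
  induction L with
  | nil => rfl
  | cons p L ih =>
    simp only [ne_eq, decide_not] at ih ⊢
    by_cases h1 : pvKey p ≠ "" ∧ pvCnt p ≠ ""
    · have hn : pvNorm p = some (pvKey p, pvCnt p) := by rw [pvNorm, if_pos h1]
      by_cases h2 : pvKey p = k
      · simp only [pvM, List.filterMap_cons, hn, List.filter_cons, List.map_cons] at ih ⊢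
        simp only [pvKey, pvCnt] at h1 h2
        simp [h2, h1.2, ih, pvM, pvCnt, pvKey]
      · simp only [pvM, List.filterMap_cons, hn, List.filter_cons, List.map_cons] at ih ⊢
        simp only [pvKey, pvCnt] at h1 h2
        simp [h2, ih, pvM, pvCnt, pvKey]
    · have hn : pvNorm p = none := by rw [pvNorm, if_neg h1]
      rw [not_and_or, not_ne_iff, not_ne_iff] at h1
      simp only [pvM, List.filterMap_cons, hn, List.filter_cons] at ih ⊢
      rcases h1 with h1 | h1
      · simp only [pvKey] at h1
        have : (PySem.Str.upper (PySem.Str.strip p.1) == k) = false := by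
          rw [h1]; exact beq_eq_false_iff_ne.mpr (Ne.symm hk)
        simp [this, ih, pvM]
      · simp only [pvCnt] at h1
        simp [h1, ih, pvM]

lemma pvMergeEq (L : List (String × String)) (k : String)
    (hfix : PySem.Str.upper (PySem.Str.strip k) = k) (hk : k ≠ "") :
    mergeLegacyPrioritySectionA L k =
      if ((pvM L).filter (fun q => q.1 == k)).map (fun q => q.2) = [] then none
      else some (pvVal L k) := by
  rw [mergeLegacyPrioritySectionA]
  rw [show PySem.Str.upper (PySem.Str.strip k) = k from hfix]
  rw [pvFilterEq L k hk, mergeBlocksA]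
  have hall : ∀ e ∈ ((pvM L).filter (fun q => q.1 == k)).map (fun q => q.2),
      e ≠ "" ∧ PySem.Str.strip e = e := by
    intro e he
    obtain ⟨q, hq, rfl⟩ := List.mem_map.mp he
    have hq' := pvMemM L q (List.mem_of_mem_filter hq)
    exact ⟨hq'.1, hq'.2.1⟩
  have hfil : (((pvM L).filter (fun q => q.1 == k)).map (fun q => q.2)).filter
      (fun b => b ≠ "" && PySem.Str.strip b ≠ "") =
      ((pvM L).filter (fun q => q.1 == k)).map (fun q => q.2) := by
    rw [List.filter_eq_self]
    intro b hb
    obtain ⟨hb1, hb2⟩ := hall b hb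
    simp [hb1, hb2]
  rw [hfil]
  have hmap : (((pvM L).filter (fun q => q.1 == k)).map (fun q => q.2)).map PySem.Str.strip =
      ((pvM L).filter (fun q => q.1 == k)).map (fun q => q.2) := by
    conv_rhs => rw [← List.map_id (((pvM L).filter (fun q => q.1 == k)).map (fun q => q.2))]
    exact List.map_congr_left (fun e he => (hall e he).2)
  rw [hmap, pvVal]

-- ---- the two loops ----
lemma pvALoop (L : List (String × String)) :
    ∀ (s : List (String × String)) (kp : List String), (∀ e ∈ s, e ∈ L) →
      s.foldl
        (fun (merged_sections : PySem.Dict String String) p =>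
          let title := PySem.Str.upper (PySem.Str.strip p.1)
          if title = "" ∨ PySem.Str.strip p.2 = "" ∨ merged_sections.contains title then merged_sections
          else
            match mergeLegacyPrioritySectionA L title with
            | none => merged_sections
            | some merged => if merged = "" then merged_sections else merged_sections.insert title merged)
        (pvD L kp) =
      pvD L (kp ++ (pvM s).map (fun q => q.1)) := by
  intro s
  induction s with
  | nil => intro kp _; simp [pvM]
  | cons e s' ih =>
    intro kp hsub
    rw [List.foldl_cons]
    have hstep : (let title := PySem.Str.upper (PySem.Str.strip e.1);
        if title = "" ∨ PySem.Str.strip e.2 = "" ∨ (pvD L kp).contains title = true then pvD L kp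
        else
          match mergeLegacyPrioritySectionA L title with
          | none => pvD L kp
          | some merged => if merged = "" then pvD L kp else (pvD L kp).insert title merged) =
        (if pvKey e = "" ∨ pvCnt e = "" ∨ (pvD L kp).contains (pvKey e) = true then pvD L kp
         else
           match mergeLegacyPrioritySectionA L (pvKey e) with
           | none => pvD L kp
           | some merged => if merged = "" then pvD L kp else (pvD L kp).insert (pvKey e) merged) := rfl
    rw [hstep]
    by_cases h1 : pvKey e ≠ "" ∧ pvCnt e ≠ ""
    · have hn : pvNorm e = some (pvKey e, pvCnt e) := by rw [pvNorm, if_pos h1]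
      have hmL : (pvKey e, pvCnt e) ∈ pvM L :=
        List.mem_filterMap.mpr ⟨e, hsub e (List.mem_cons_self), hn⟩
      have hcmem : pvCnt e ∈ ((pvM L).filter (fun q => q.1 == pvKey e)).map (fun q => q.2) := by
        exact List.mem_map_of_mem (List.mem_filter.mpr ⟨hmL, by simp⟩)
      by_cases hmem : pvKey e ∈ PySem.Set.ofList kp
      · have hcont : (pvD L kp).contains (pvKey e) = true := by
          rw [pvContainsD]; simpa using hmem
        rw [if_pos (Or.inr (Or.inr hcont))]
        rw [ih kp (fun x hx => hsub x (List.mem_cons_of_mem e hx))]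
        rw [show pvM (e :: s') = (pvKey e, pvCnt e) :: pvM s' from by
          rw [pvM, List.filterMap_cons, hn]; rfl]
        rw [List.map_cons, pvDSkip L kp (pvKey e) ((pvM s').map (fun q => q.1)) hmem]
      · have hcont : (pvD L kp).contains (pvKey e) = false := by
          rw [pvContainsD]; simpa using hmem
        rw [if_neg (by
          rintro (h | h | h)
          · exact h1.1 h
          · exact h1.2 h
          · rw [hcont] at h; exact Bool.false_ne_true h)]
        have hne : ((pvM L).filter (fun q => q.1 == pvKey e)).map (fun q => q.2) ≠ [] :=
          List.ne_nil_of_mem hcmem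
        rw [pvMergeEq L (pvKey e) (pvKeyFix e.1) h1.1, if_neg hne]
        have hval : pvVal L (pvKey e) ≠ "" := by
          obtain ⟨m0, ms, hm⟩ :
              ∃ m0 ms, ((pvM L).filter (fun q => q.1 == pvKey e)).map (fun q => q.2) = m0 :: ms := by
            rcases hx : ((pvM L).filter (fun q => q.1 == pvKey e)).map (fun q => q.2) with _ | ⟨a, b⟩
            · exact absurd hx hne
            · exact ⟨a, b, hx⟩
          have hm0 : m0 ≠ "" := by
            have : m0 ∈ ((pvM L).filter (fun q => q.1 == pvKey e)).map (fun q => q.2) := by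
              rw [hm]; exact List.mem_cons_self
            obtain ⟨q, hq, rfl⟩ := List.mem_map.mp this
            exact (pvMemM L q (List.mem_of_mem_filter hq)).1
          rw [pvVal, hm]
          exact pvJoinNeEmpty m0 ms hm0
        rw [show (match some (pvVal L (pvKey e)) with
              | none => pvD L kp
              | some merged => if merged = "" then pvD L kp else (pvD L kp).insert (pvKey e) merged) =
            (if pvVal L (pvKey e) = "" then pvD L kp
             else (pvD L kp).insert (pvKey e) (pvVal L (pvKey e))) from rfl]
        rw [if_neg hval]
        have hins : (pvD L kp).insert (pvKey e) (pvVal L (pvKey e)) = pvD L (kp ++ [pvKey e]) := by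
          apply PySem.Dict.ext
          rw [PySem.Dict.items_insert_of_not_contains _ _ hcont]
          have hofl : PySem.Set.ofList (kp ++ [pvKey e]) = PySem.Set.ofList kp ++ [pvKey e] := by
            rw [PySem.Set.ofList_append, PySem.Set.update_cons, PySem.Set.update_nil,
              PySem.Set.add, if_neg]
            intro hc
            exact hmem (by simpa using hc)
          show ((PySem.Set.ofList kp).map (fun k => (k, pvVal L k))) ++ [(pvKey e, pvVal L (pvKey e))] =
            (PySem.Set.ofList (kp ++ [pvKey e])).map (fun k => (k, pvVal L k))
          rw [hofl, List.map_append]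
          rfl
        rw [hins, ih (kp ++ [pvKey e]) (fun x hx => hsub x (List.mem_cons_of_mem e hx))]
        rw [show pvM (e :: s') = (pvKey e, pvCnt e) :: pvM s' from by
          rw [pvM, List.filterMap_cons, hn]; rfl]
        rw [List.map_cons, List.append_assoc]
        rfl
    · have hn : pvNorm e = none := by rw [pvNorm, if_neg h1]
      have hguard : pvKey e = "" ∨ pvCnt e = "" ∨ (pvD L kp).contains (pvKey e) = true := by
        rcases not_and_or.mp h1 with h | h
        · exact Or.inl (not_ne_iff.mp h)
        · exact Or.inr (Or.inl (not_ne_iff.mp h))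
      rw [if_pos hguard, ih kp (fun x hx => hsub x (List.mem_cons_of_mem e hx))]
      rw [show pvM (e :: s') = pvM s' from by rw [pvM, List.filterMap_cons, hn]; rfl]

lemma pvAEq (L : List (String × String)) :
    normalized_legacy_sections_py L = pvSpecList L := by
  rw [normalized_legacy_sections_py]
  rw [show (PySem.Dict.empty : PySem.Dict String String) = pvD L [] from rfl]
  rw [pvALoop L L [] (fun e he => he), List.nil_append]
  rfl

lemma pvBGroupLoop (L : List (String × String)) :
    ∀ (g : PySem.Dict String (List String)),
      L.foldl
        (fun g p =>
          let title := PySem.Str.upper (PySem.Str.strip p.1)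
          let content := PySem.Str.strip p.2
          if title ≠ "" ∧ content ≠ "" then g.insert title (g.getD title [] ++ [content]) else g)
        g =
      (pvM L).foldl (fun g q => g.modify q.1 [] (fun v => v ++ [q.2])) g := by
  induction L with
  | nil => intro g; show g = g; rfl
  | cons p L ih =>
    intro g
    rw [List.foldl_cons]
    rw [show (let title := PySem.Str.upper (PySem.Str.strip p.1);
        let content := PySem.Str.strip p.2;
        if title ≠ "" ∧ content ≠ "" then g.insert title (g.getD title [] ++ [content]) else g) =
      (if pvKey p ≠ "" ∧ pvCnt p ≠ "" then g.insert (pvKey p) (g.getD (pvKey p) [] ++ [pvCnt p])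
       else g) from rfl]
    by_cases h1 : pvKey p ≠ "" ∧ pvCnt p ≠ ""
    · rw [if_pos h1]
      rw [show pvM (p :: L) = (pvKey p, pvCnt p) :: pvM L from by
        rw [pvM, List.filterMap_cons, show pvNorm p = some (pvKey p, pvCnt p) from by
          rw [pvNorm, if_pos h1]]; rfl]
      rw [List.foldl_cons]
      rw [show PySem.Dict.modify g (pvKey p) [] (fun v => v ++ [pvCnt p]) =
        g.insert (pvKey p) (g.getD (pvKey p) [] ++ [pvCnt p]) from rfl]
      exact ih _
    · rw [if_neg h1]
      rw [show pvM (p :: L) = pvM L from by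
        rw [pvM, List.filterMap_cons, show pvNorm p = none from by rw [pvNorm, if_neg h1]]; rfl]
      exact ih g

lemma pvBEq (L : List (String × String)) :
    normalized_legacy_sections_py_alt L = pvSpecList L := by
  rw [normalized_legacy_sections_py_alt]
  show (PySem.Dict.ofList
      ((L.foldl
          (fun g p =>
            let title := PySem.Str.upper (PySem.Str.strip p.1)
            let content := PySem.Str.strip p.2
            if title ≠ "" ∧ content ≠ "" then g.insert title (g.getD title [] ++ [content]) else g)
          PySem.Dict.empty).items.map
        (fun q => (q.1, PySem.Str.join "\n\n" q.2)))).items = pvSpecList L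
  rw [pvBGroupLoop L PySem.Dict.empty]
  have hkeys : ((pvM L).foldl (fun g q => g.modify q.1 [] (fun v => v ++ [q.2]))
      (PySem.Dict.empty : PySem.Dict String (List String))).keys =
      PySem.Set.ofList ((pvM L).map (fun q => q.1)) := by
    rw [PySem.Dict.keys_foldl_modify_key (pvM L) (fun q => q.1) [] (fun _ q => (fun v => v ++ [q.2]))]
    rw [PySem.Dict.keys_empty, PySem.Set.update_nil_left]
  have hnodup : ((pvM L).foldl (fun g q => g.modify q.1 [] (fun v => v ++ [q.2]))
      (PySem.Dict.empty : PySem.Dict String (List String))).keys.Nodup := by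
    exact PySem.Dict.nodup_keys_foldl_modify_key (pvM L) (fun q => q.1) []
      (fun _ q => (fun v => v ++ [q.2])) PySem.Dict.empty PySem.Dict.nodup_keys_empty
  have hgetD : ∀ k, ((pvM L).foldl (fun g q => g.modify q.1 [] (fun v => v ++ [q.2]))
      (PySem.Dict.empty : PySem.Dict String (List String))).getD k [] =
      ((pvM L).filter (fun q => q.1 == k)).map (fun q => q.2) := by
    intro k
    have h := PySem.Dict.getD_foldl_modify_append (pvM L)
      (PySem.Dict.empty : PySem.Dict String (List String)) k
    simpa [PySem.Dict.getD_empty] using h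
  set G := (pvM L).foldl (fun g q => g.modify q.1 [] (fun v => v ++ [q.2]))
      (PySem.Dict.empty : PySem.Dict String (List String)) with hG
  have hmapfst : (G.items.map (fun q => (q.1, PySem.Str.join "\n\n" q.2))).map Prod.fst = G.keys := by
    rw [List.map_map]; rfl
  show (List.foldl (fun acc p => acc.insert p.1 p.2) PySem.Dict.empty
      (G.items.map (fun q => (q.1, PySem.Str.join "\n\n" q.2)))).items = pvSpecList L
  rw [PySem.Dict.items_foldl_insert_fresh (G.items.map (fun q => (q.1, PySem.Str.join "\n\n" q.2)))
    Prod.fst Prod.snd PySem.Dict.empty (fun a _ => PySem.Dict.contains_empty _)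
    (by rw [hmapfst]; exact hnodup)]
  rw [show (PySem.Dict.empty : PySem.Dict String String).items = [] from rfl, List.nil_append]
  rw [show ((G.items.map (fun q => (q.1, PySem.Str.join "\n\n" q.2))).map
      (fun a => (a.1, a.2))) = G.items.map (fun q => (q.1, PySem.Str.join "\n\n" q.2)) from by
    simp]
  rw [PySem.Dict.items_eq_map_keys G hnodup []]
  rw [List.map_map]
  rw [List.map_congr_left (fun k _ => by
    show (k, PySem.Str.join "\n\n" (G.getD k [])) = (k, pvVal L k)
    rw [hG, hgetD k]; rfl)]
  rw [hkeys]
  rfl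

-- ===== VERDICT (by name: the statement is the Claim_ definition above) =====
theorem normalized_legacy_sections_py_spec : Claim_equal_normalized_legacy_sections_py := by
  intro L _
  unfold Spec_normalized_legacy_sections_py
  rw [pvAEq, pvBEq]
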